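-- pv_equiv track=rewrite | github.com/discegauderem8/Python_pt2_S2 | HW_002.py | getmult
-- ===== SOURCE A (Python) =====
-- import math
--
-- def getmult(fractions_parts):
--     numerator = 1
--     nominator = 1
--
--     for i in fractions_parts:
--         numerator *= int(i[0])
--         nominator *= int(i[1])
--
--     gcd = math.gcd(numerator, nominator)
--
--     if gcd > 1:
--         numerator //= gcd
--         nominator //= gcd
--
--     return f"{numerator}/{nominator}"
-- ===== SOURCE B (Python) =====
-- import math
--
-- def getmult(fractions_parts):
--     num = 1
--     den = 1
--     for i in fractions_parts:
--         num *= int(i[0])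
--         den *= int(i[1])
--         g = math.gcd(num, den)
--         if g > 1:
--             num //= g
--             den //= g
--     return f"{num}/{den}"
-- ===== Notes on version B (the rewrite author's own statement) =====
-- stated objective: alternative
-- what changed: B keeps a running fraction that it cross-reduces by the gcd after every multiplication (an always-reduced invariant, bounded intermediates), instead of A's multiply-everything-then-reduce-once pass.
import Mathlib
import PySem

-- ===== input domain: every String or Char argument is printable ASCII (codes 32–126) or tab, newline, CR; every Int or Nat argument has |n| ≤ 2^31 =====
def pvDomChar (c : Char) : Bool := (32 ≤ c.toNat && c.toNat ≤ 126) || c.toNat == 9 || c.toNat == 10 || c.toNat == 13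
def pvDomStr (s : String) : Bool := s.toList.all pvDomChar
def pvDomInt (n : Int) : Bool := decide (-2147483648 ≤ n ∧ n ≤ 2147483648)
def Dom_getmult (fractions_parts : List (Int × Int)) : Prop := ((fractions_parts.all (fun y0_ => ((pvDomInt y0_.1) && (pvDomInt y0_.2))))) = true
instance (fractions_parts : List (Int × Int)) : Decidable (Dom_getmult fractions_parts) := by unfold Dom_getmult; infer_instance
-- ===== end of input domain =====

-- B multiplies the fractions while keeping an always-reduced running fraction (gcd-division after
-- every step) instead of A's multiply-everything-then-reduce-once pass; same result, different decomposition.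

-- ===== PORT A =====
-- int(i[0]) on an int is the identity; math.gcd → Int.gcd (non-negative); // → PySem.Int.floordiv.
def getmult (fractions_parts : List (Int × Int)) : String :=
  let st := fractions_parts.foldl (fun (s : Int × Int) i => (s.1 * i.1, s.2 * i.2)) (1, 1)
  let g : Int := Int.gcd st.1 st.2
  let st2 := if 1 < g then (PySem.Int.floordiv st.1 g, PySem.Int.floordiv st.2 g) else st
  PySem.Int.toStr st2.1 ++ "/" ++ PySem.Int.toStr st2.2

-- ===== PORT B =====
-- one loop iteration of Source B: multiply in the pair, then cross-reduce by the gcd if it exceeds 1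
def getmultAltStep (s : Int × Int) (i : Int × Int) : Int × Int :=
  let n := s.1 * i.1
  let d := s.2 * i.2
  let g : Int := Int.gcd n d
  if 1 < g then (PySem.Int.floordiv n g, PySem.Int.floordiv d g) else (n, d)

def getmult_alt (fractions_parts : List (Int × Int)) : String :=
  let st := fractions_parts.foldl getmultAltStep (1, 1)
  PySem.Int.toStr st.1 ++ "/" ++ PySem.Int.toStr st.2

-- ===== PRECONDITION & SPEC =====
def Spec_getmult (fractions_parts : List (Int × Int)) (out : String) : Prop := out = getmult_alt fractions_parts
instance (fractions_parts : List (Int × Int)) (out : String) : Decidable (Spec_getmult fractions_parts out) := by unfold Spec_getmult; infer_instance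

-- ===== CLAIM (what is proved, stated in full; the proofs are below) =====
def Claim_equal_getmult : Prop := ∀ (fractions_parts : List (Int × Int)), Dom_getmult fractions_parts → Spec_getmult fractions_parts (getmult fractions_parts)

-- ===== LEMMAS AND PROOFS =====

/-- Reduction of a pair by its (non-negative) gcd, using mathematical `/` (exact here). -/
def pvRed (p : Int × Int) : Int × Int :=
  let g : Int := Int.gcd p.1 p.2
  if 1 < g then (p.1 / g, p.2 / g) else p

theorem pvRed_scale (g u v : Int) (hg : 0 < g) : pvRed (g * u, g * v) = pvRed (u, v) := by
  unfold pvRed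
  simp only
  have hgcd : Int.gcd (g * u) (g * v) = g.natAbs * Int.gcd u v := Int.gcd_mul_left g u v
  rcases Nat.eq_zero_or_pos (Int.gcd u v) with h0 | hpos
  · have hu : u = 0 := Int.eq_zero_of_gcd_eq_zero_left h0
    have hv : v = 0 := Int.eq_zero_of_gcd_eq_zero_right h0
    subst hu; subst hv
    simp
  · have hna : (g.natAbs : Int) = g := Int.natAbs_of_nonneg hg.le
    have hG : ((Int.gcd (g * u) (g * v) : Nat) : Int) = g * (Int.gcd u v : Int) := by
      rw [hgcd]; push_cast; rw [abs_of_pos hg]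
    by_cases hh : 1 < (Int.gcd u v : Int)
    · have hGgt : 1 < ((Int.gcd (g * u) (g * v) : Nat) : Int) := by
        rw [hG]; nlinarith
      rw [if_pos hGgt, if_pos hh, hG]
      have h1 : g * u / (g * (Int.gcd u v : Int)) = u / (Int.gcd u v : Int) :=
        Int.mul_ediv_mul_of_pos _ _ hg
      have h2 : g * v / (g * (Int.gcd u v : Int)) = v / (Int.gcd u v : Int) :=
        Int.mul_ediv_mul_of_pos _ _ hg
      rw [h1, h2]
    · have h1 : (Int.gcd u v : Int) = 1 := by
        have : (1 : Int) ≤ (Int.gcd u v : Int) := by exact_mod_cast hpos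
        omega
      rw [if_neg hh]
      by_cases hg1 : 1 < g
      · have hGgt : 1 < ((Int.gcd (g * u) (g * v) : Nat) : Int) := by rw [hG, h1]; omega
        rw [if_pos hGgt, hG, h1, mul_one]
        have hgne : g ≠ 0 := by omega
        rw [Int.mul_ediv_cancel_left u hgne, Int.mul_ediv_cancel_left v hgne]
      · have hgeq : g = 1 := by omega
        have hGle : ¬ 1 < ((Int.gcd (g * u) (g * v) : Nat) : Int) := by
          rw [hG, h1, hgeq]; omega
        rw [if_neg hGle, hgeq, one_mul, one_mul]

theorem pvRed_step (p : Int × Int) (c d : Int) :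
    pvRed ((pvRed p).1 * c, (pvRed p).2 * d) = pvRed (p.1 * c, p.2 * d) := by
  by_cases hg : 1 < ((Int.gcd p.1 p.2 : Nat) : Int)
  · have hred : pvRed p = (p.1 / (Int.gcd p.1 p.2 : Int), p.2 / (Int.gcd p.1 p.2 : Int)) := by
      unfold pvRed; simp only [if_pos hg]
    have h1 : (Int.gcd p.1 p.2 : Int) * (p.1 / (Int.gcd p.1 p.2 : Int)) = p.1 :=
      Int.mul_ediv_cancel' (Int.gcd_dvd_left p.1 p.2)
    have h2 : (Int.gcd p.1 p.2 : Int) * (p.2 / (Int.gcd p.1 p.2 : Int)) = p.2 :=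
      Int.mul_ediv_cancel' (Int.gcd_dvd_right p.1 p.2)
    rw [hred]
    have := pvRed_scale (Int.gcd p.1 p.2 : Int) ((p.1 / (Int.gcd p.1 p.2 : Int)) * c)
      ((p.2 / (Int.gcd p.1 p.2 : Int)) * d) (by omega)
    rw [← mul_assoc, ← mul_assoc, h1, h2] at this
    exact this.symm ▸ this
  · have hred : pvRed p = p := by unfold pvRed; simp only [if_neg hg]
    rw [hred]

/-- B's step is exactly "multiply then reduce". -/
theorem getmultAltStep_eq (s i : Int × Int) :
    getmultAltStep s i = pvRed (s.1 * i.1, s.2 * i.2) := by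
  unfold getmultAltStep pvRed
  simp only
  by_cases hg : 1 < ((Int.gcd (s.1 * i.1) (s.2 * i.2) : Nat) : Int)
  · rw [if_pos hg, if_pos hg,
      PySem.Int.floordiv_eq_ediv_of_pos (by omega),
      PySem.Int.floordiv_eq_ediv_of_pos (by omega)]
  · rw [if_neg hg, if_neg hg]

/-- Loop invariant: folding B's reduce-at-each-step loop from a reduced state
    computes the reduction of the plain product fold. -/
theorem foldl_step_eq (l : List (Int × Int)) (p : Int × Int) :
    l.foldl getmultAltStep (pvRed p) =
      pvRed (l.foldl (fun (s : Int × Int) i => (s.1 * i.1, s.2 * i.2)) p) := by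
  induction l generalizing p with
  | nil => rfl
  | cons i t ih =>
    simp only [List.foldl_cons]
    rw [getmultAltStep_eq, pvRed_step]
    exact ih (p.1 * i.1, p.2 * i.2)

theorem pvRed_one_one : pvRed (1, 1) = (1, 1) := by decide

-- ===== VERDICT (by name: the statement is the Claim_ definition above) =====
theorem getmult_spec : Claim_equal_getmult := by
  intro l _
  unfold Spec_getmult getmult getmult_alt
  simp only
  have hfold : l.foldl getmultAltStep (1, 1) =
      pvRed (l.foldl (fun (s : Int × Int) i => (s.1 * i.1, s.2 * i.2)) (1, 1)) := by
    conv_lhs => rw [← pvRed_one_one]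
    rw [foldl_step_eq]
  set st := l.foldl (fun (s : Int × Int) i => (s.1 * i.1, s.2 * i.2)) (1, 1) with hst
  have hA : (if 1 < ((Int.gcd st.1 st.2 : Nat) : Int) then
      (PySem.Int.floordiv st.1 (Int.gcd st.1 st.2 : Int),
       PySem.Int.floordiv st.2 (Int.gcd st.1 st.2 : Int)) else st) = pvRed st := by
    unfold pvRed
    by_cases hg : 1 < ((Int.gcd st.1 st.2 : Nat) : Int)
    · simp only [if_pos hg,
        PySem.Int.floordiv_eq_ediv_of_pos (show (0:Int) < (Int.gcd st.1 st.2 : Int) by omega)]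
    · simp only [if_neg hg]
  rw [hfold, hA]
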